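-- pv_equiv track=rewrite | github.com/nbratek/WDI | zestaw 6/zad1.py | wykresl
-- ===== SOURCE A (Python) =====
-- def wykresl(x, A):
--     n = 0
--     j = 0
--     for i in range(len(A)):
--         y = x % 10
--         if A[i] == 0:
--             n = y * (10 ** j) + n
--             j += 1
--         x //= 10
--     return n
-- ===== SOURCE B (Python) =====
-- def wykresl(x, A):
--     digits = [(x // 10 ** i) % 10 for i in range(len(A)) if A[i] == 0]
--     n = 0
--     for d in reversed(digits):
--         n = n * 10 + d
--     return n
-- ===== Notes on version B (the rewrite author's own statement) =====
-- stated objective: alternative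
-- what changed: Replaces A's single interleaved loop that mutates x (x //= 10) while accumulating n with an explicit 10**j weight by two separate passes: positional digit selection via (x // 10**i) % 10, then a Horner fold over the reversed digit list.
import Mathlib
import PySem

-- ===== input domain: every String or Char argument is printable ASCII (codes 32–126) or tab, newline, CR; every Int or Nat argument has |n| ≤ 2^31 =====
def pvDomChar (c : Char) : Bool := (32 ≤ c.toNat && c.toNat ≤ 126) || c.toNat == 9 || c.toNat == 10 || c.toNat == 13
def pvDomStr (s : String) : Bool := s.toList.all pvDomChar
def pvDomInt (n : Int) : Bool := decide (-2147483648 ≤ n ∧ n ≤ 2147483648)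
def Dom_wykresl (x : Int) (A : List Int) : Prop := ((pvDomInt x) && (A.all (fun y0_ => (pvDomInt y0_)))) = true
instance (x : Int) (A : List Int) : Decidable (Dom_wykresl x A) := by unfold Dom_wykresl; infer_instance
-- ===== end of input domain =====

-- B replaces A's interleaved peel-and-accumulate loop (mutating x with //= 10 and
-- weighting by a running 10**j) by two passes: positional digit selection, then a
-- Horner fold over the reversed digit list; alternative decomposition, not faster.

-- ===== PORT A =====
-- the loop over range(len(A)) reads only A[i], so it is the structural recursion on A;
-- state (n, j, x) as in the Python, j kept as the exponent of the running weight 10 ** j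
def wykreslGo (A : List Int) (n : Int) (j : Nat) (x : Int) : Int :=
  match A with
  | [] => n
  | a :: rest =>
    let y := PySem.Int.mod x 10
    if a == 0 then wykreslGo rest (y * 10 ^ j + n) (j + 1) (PySem.Int.floordiv x 10)
    else wykreslGo rest n j (PySem.Int.floordiv x 10)

def wykresl (x : Int) (A : List Int) : Int := wykreslGo A 0 0 x

-- ===== PORT B =====
def wykresl_alt (x : Int) (A : List Int) : Int :=
  let digits := (PySem.List.enumerate A).filterMap (fun p =>
    if p.2 == 0 then some (PySem.Int.mod (PySem.Int.floordiv x (10 ^ p.1.toNat)) 10) else none)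
  digits.reverse.foldl (fun n d => n * 10 + d) 0

-- ===== PRECONDITION & SPEC =====
def Spec_wykresl (x : Int) (A : List Int) (out : Int) : Prop := out = wykresl_alt x A
instance (x : Int) (A : List Int) (out : Int) : Decidable (Spec_wykresl x A out) := by unfold Spec_wykresl; infer_instance

-- ===== CLAIM (what is proved, stated in full; the proofs are below) =====
def Claim_equal_wykresl : Prop := ∀ (x : Int) (A : List Int), Dom_wykresl x A → Spec_wykresl x A (wykresl x A)

-- ===== LEMMAS AND PROOFS =====

-- the selected digits of x, least significant first (proof-only reference list)
def pvSel (A : List Int) (x : Int) : List Int :=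
  match A with
  | [] => []
  | a :: rest =>
    if a = 0 then PySem.Int.mod x 10 :: pvSel rest (PySem.Int.floordiv x 10)
    else pvSel rest (PySem.Int.floordiv x 10)

def pvVal (l : List Int) : Int := l.foldr (fun d n => n * 10 + d) 0

lemma fdiv_pow_succ (x : Int) (s : Nat) :
    PySem.Int.floordiv (PySem.Int.floordiv x (10 ^ s)) 10 = PySem.Int.floordiv x (10 ^ (s + 1)) := by
  have h1 : (0:Int) < 10 ^ s := by positivity
  have h2 : (0:Int) < 10 ^ (s + 1) := by positivity
  rw [PySem.Int.floordiv_eq_ediv_of_pos h1, PySem.Int.floordiv_eq_ediv_of_pos (by norm_num : (0:Int) < 10),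
    PySem.Int.floordiv_eq_ediv_of_pos h2, Int.ediv_ediv_of_nonneg (le_of_lt h1), pow_succ]

lemma wykreslGo_eq (A : List Int) (x n : Int) (j : Nat) :
    wykreslGo A n j x = pvVal (pvSel A x) * 10 ^ j + n := by
  induction A generalizing x n j with
  | nil => simp [wykreslGo, pvSel, pvVal]
  | cons a rest ih =>
    by_cases ha : a = 0
    · simp only [wykreslGo, pvSel, ha, beq_self_eq_true, if_true, ih, pvVal,
        List.foldr_cons]
      ring
    · simp only [wykreslGo, pvSel, if_neg ha, beq_iff_eq, ih]

lemma filterMap_enumerate_eq_pvSel (A : List Int) (x : Int) (s : Nat) :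
    (PySem.List.enumerate A (s : Int)).filterMap (fun p =>
      if p.2 == 0 then some (PySem.Int.mod (PySem.Int.floordiv x (10 ^ p.1.toNat)) 10) else none)
    = pvSel A (PySem.Int.floordiv x (10 ^ s)) := by
  induction A generalizing s with
  | nil => simp [PySem.List.enumerate_nil, pvSel]
  | cons a rest ih =>
    have hcast : ((s : Int) + 1) = ((s + 1 : Nat) : Int) := by push_cast; ring
    simp only [PySem.List.enumerate_cons, List.filterMap_cons, hcast, ih (s + 1)]
    by_cases ha : a = 0
    · simp only [beq_self_eq_true, if_true, ha, pvSel, Int.toNat_natCast]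
      rw [fdiv_pow_succ]
    · simp only [beq_iff_eq, ha, if_false, pvSel]
      rw [fdiv_pow_succ]

lemma wykresl_alt_eq (x : Int) (A : List Int) : wykresl_alt x A = pvVal (pvSel A x) := by
  have h0 : PySem.List.enumerate A = PySem.List.enumerate A ((0 : Nat) : Int) := by norm_num
  rw [wykresl_alt, List.foldl_reverse, h0, filterMap_enumerate_eq_pvSel]
  simp [pvVal, PySem.Int.floordiv, Int.fdiv_one]

-- ===== VERDICT (by name: the statement is the Claim_ definition above) =====
theorem wykresl_spec : Claim_equal_wykresl := by
  intro x A _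
  show wykresl x A = wykresl_alt x A
  rw [wykresl, wykreslGo_eq, wykresl_alt_eq]
  ring
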